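-- pv_equiv track=rewrite | github.com/Aayushjn/VerticalFragmentation | bea.py | get_attribute_affinity_matrix
-- ===== SOURCE A (Python) =====
-- from typing import List, Tuple
--
-- def get_attribute_affinity_matrix(usage: List[List[int]],
--                                   freq: List[List[int]],
--                                   cost: List[List[int]]) -> List[List[int]]:
--     """
--     Calculates attribute affinity matrix
--     :param usage: attribute usage matrix
--     :param freq: query frequency matrix
--     :param cost: query cost matrix
--     :return: attribute affinity matrix
--     """
--     num_attr = len(usage[0])
--     num_sites = len(freq[0])
--     num_query = len(freq)
--     matrix = [[0 for _ in range(num_attr)] for _ in range(num_attr)]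
--
--     for i in range(num_attr):
--         for j in range(num_attr):
--             out_sum = 0
--             for k in range(num_query):
--                 if usage[k][i] == 1 and usage[k][j] == 1:
--                     in_sum = 0
--                     for l in range(num_sites):
--                         in_sum += (freq[k][l] * cost[k][l])
--                     out_sum += in_sum
--             matrix[i][j] = out_sum
--
--     return matrix
-- ===== SOURCE B (Python) =====
-- from typing import List
--
--
-- def get_attribute_affinity_matrix(usage: List[List[int]],
--                                   freq: List[List[int]],
--                                   cost: List[List[int]]) -> List[List[int]]:
--     num_attr = len(usage[0])
--     num_sites = len(freq[0])
--     num_query = len(freq)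
--     if num_attr == 0:
--         return []
--     # queries that use at least one attribute, each with its access cost computed once
--     active = [(k, sum(freq[k][l] * cost[k][l] for l in range(num_sites)))
--               for k in range(num_query) if 1 in usage[k][:num_attr]]
--     return [[sum(w for k, w in active
--                  if usage[k][i] == 1 and usage[k][j] == 1)
--              for j in range(num_attr)]
--             for i in range(num_attr)]
-- ===== Notes on version B (the rewrite author's own statement) =====
-- stated objective: faster
-- what changed: B precomputes, in one pass over the queries, the list of active queries (those using some attribute) paired with their site-access weight (sum of freq*cost over sites), then fills each matrix cell by a single scan of that list, instead of re-running the query and site loops inside the attribute-pair double loop.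
import Mathlib
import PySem

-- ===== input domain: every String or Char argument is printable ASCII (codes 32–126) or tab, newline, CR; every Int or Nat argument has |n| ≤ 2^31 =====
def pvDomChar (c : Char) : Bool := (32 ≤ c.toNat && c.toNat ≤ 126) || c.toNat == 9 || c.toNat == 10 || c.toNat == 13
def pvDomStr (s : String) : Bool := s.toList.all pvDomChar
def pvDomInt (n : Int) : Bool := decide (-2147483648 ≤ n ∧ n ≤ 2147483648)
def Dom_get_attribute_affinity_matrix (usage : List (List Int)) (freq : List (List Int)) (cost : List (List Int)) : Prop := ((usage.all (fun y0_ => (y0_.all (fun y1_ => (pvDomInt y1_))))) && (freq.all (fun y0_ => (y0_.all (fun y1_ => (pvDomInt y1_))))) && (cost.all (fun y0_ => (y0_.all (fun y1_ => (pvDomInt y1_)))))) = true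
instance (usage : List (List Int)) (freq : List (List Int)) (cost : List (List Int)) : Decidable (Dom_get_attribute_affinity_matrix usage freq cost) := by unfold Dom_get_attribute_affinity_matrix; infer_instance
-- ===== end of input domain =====

-- B precomputes once the list of active queries (those using some attribute) with their
-- site-access weight, and each matrix cell scans only that list, instead of A's re-running of
-- the query and site loops inside the attribute-pair double loop — same return value; the
-- timing run measured B faster.

-- ===== PORT A =====
def get_attribute_affinity_matrix (usage : List (List Int)) (freq : List (List Int)) (cost : List (List Int)) : List (List Int) :=
  let num_attr := (usage.getD 0 []).length
  let num_sites := (freq.getD 0 []).length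
  let num_query := freq.length
  (List.range num_attr).map (fun i =>
    (List.range num_attr).map (fun j =>
      (List.range num_query).foldl (fun out_sum k =>
        if (usage.getD k []).getD i 0 = 1 ∧ (usage.getD k []).getD j 0 = 1 then
          out_sum + (List.range num_sites).foldl (fun in_sum l =>
            in_sum + (freq.getD k []).getD l 0 * (cost.getD k []).getD l 0) 0
        else out_sum) 0))

-- ===== PORT B =====
def get_attribute_affinity_matrix_alt (usage : List (List Int)) (freq : List (List Int)) (cost : List (List Int)) : List (List Int) :=
  let num_attr := (usage.getD 0 []).length
  let num_sites := (freq.getD 0 []).length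
  let num_query := freq.length
  if num_attr = 0 then []
  else
    let active := ((List.range num_query).filter (fun k =>
        (PySem.List.slice (usage.getD k []) none (some (num_attr : Int))).contains 1)).map
      (fun k => (k, (List.range num_sites).foldl (fun s l =>
        s + (freq.getD k []).getD l 0 * (cost.getD k []).getD l 0) 0))
    (List.range num_attr).map (fun i =>
      (List.range num_attr).map (fun j =>
        active.foldl (fun acc kw =>
          if (usage.getD kw.1 []).getD i 0 = 1 ∧ (usage.getD kw.1 []).getD j 0 = 1 then
            acc + kw.2
          else acc) 0))

-- ===== PRECONDITION & SPEC =====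
-- Pre_: exactly the inputs on which the Python A returns (A raises IndexError on empty usage/freq,
-- on usage rows shorter than len(usage[0]) reached by the query loop, and on freq/cost rows the
-- active inner loop indexes past their end).
def Pre_get_attribute_affinity_matrix (usage : List (List Int)) (freq : List (List Int)) (cost : List (List Int)) : Prop :=
  usage ≠ [] ∧ freq ≠ [] ∧
  ((usage.getD 0 []).length = 0 ∨
    ∀ k < freq.length,
      k < usage.length ∧ (usage.getD 0 []).length ≤ (usage.getD k []).length ∧
      ((∃ i < (usage.getD 0 []).length, (usage.getD k []).getD i 0 = 1) →
        0 < (freq.getD 0 []).length →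
          (freq.getD 0 []).length ≤ (freq.getD k []).length ∧ k < cost.length ∧
          (freq.getD 0 []).length ≤ (cost.getD k []).length))
instance (usage : List (List Int)) (freq : List (List Int)) (cost : List (List Int)) : Decidable (Pre_get_attribute_affinity_matrix usage freq cost) := by unfold Pre_get_attribute_affinity_matrix; infer_instance

def pvWitness_get_attribute_affinity_matrix : List (List Int) × List (List Int) × List (List Int) :=
  ([[1, 0], [1, 1]], ([[2, 3], [1, 0]], [[1, 1], [2, 2]]))

def Spec_get_attribute_affinity_matrix (usage : List (List Int)) (freq : List (List Int)) (cost : List (List Int)) (out : List (List Int)) : Prop := out = get_attribute_affinity_matrix_alt usage freq cost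
instance (usage : List (List Int)) (freq : List (List Int)) (cost : List (List Int)) (out : List (List Int)) : Decidable (Spec_get_attribute_affinity_matrix usage freq cost out) := by unfold Spec_get_attribute_affinity_matrix; infer_instance

-- ===== CLAIM (what is proved, stated in full; the proofs are below) =====
def Claim_equal_get_attribute_affinity_matrix : Prop := ∀ (usage : List (List Int)) (freq : List (List Int)) (cost : List (List Int)), Dom_get_attribute_affinity_matrix usage freq cost → Pre_get_attribute_affinity_matrix usage freq cost → Spec_get_attribute_affinity_matrix usage freq cost (get_attribute_affinity_matrix usage freq cost)

-- ===== LEMMAS AND PROOFS =====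

-- an attribute hit inside the first num_attr entries puts a 1 in the row's prefix
lemma pv_one_mem_take (l : List Int) (n i : Nat) (hi : i < n) (h : l.getD i 0 = 1) :
    (l.take n).contains 1 = true := by
  have hil : i < l.length := by
    by_contra hle
    rw [List.getD_eq_default l 0 (by omega)] at h
    exact absurd h (by norm_num)
  have hgl : l[i] = 1 := by rwa [List.getD_eq_getElem l 0 hil] at h
  have : (1 : Int) ∈ l.take n := by
    have hlen : i < (l.take n).length := by simp; omega
    have : (l.take n)[i] = l[i] := List.getElem_take
    exact hgl ▸ this ▸ List.getElem_mem hlen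
  simpa [List.contains_iff_mem] using this

lemma pv_ports_eq (usage freq cost : List (List Int)) :
    get_attribute_affinity_matrix usage freq cost =
      get_attribute_affinity_matrix_alt usage freq cost := by
  unfold get_attribute_affinity_matrix get_attribute_affinity_matrix_alt
  by_cases h : (usage.getD 0 []).length = 0
  · simp only [h]
    simp
  · rw [if_neg h]
    apply List.map_congr_left
    intro i hi
    apply List.map_congr_left
    intro j hj
    rw [List.mem_range] at hi hj
    rw [List.foldl_map, List.foldl_filter]
    apply PySem.List.foldl_congr_mem
    intro acc k _
    by_cases hc : (usage.getD k []).getD i 0 = 1 ∧ (usage.getD k []).getD j 0 = 1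
    · rw [if_pos hc,
        PySem.List.slice_to_natCast (usage.getD k []) (usage.getD 0 []).length,
        pv_one_mem_take (usage.getD k []) _ i hi hc.1, if_pos rfl]
    · rw [if_neg hc]
      split <;> rfl

-- ===== VERDICT (by name: the statement is the Claim_ definition above) =====
theorem get_attribute_affinity_matrix_spec : Claim_equal_get_attribute_affinity_matrix := by
  intro usage freq cost _ _
  unfold Spec_get_attribute_affinity_matrix
  exact pv_ports_eq usage freq cost
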